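-- pv_equiv track=rewrite | github.com/etiennedyer/poker-coach | backend/app/facts.py | _board_flags
-- ===== SOURCE A (Python) =====
-- from typing import Dict, List, Tuple
--
-- RANK_ORDER = {"2": 2, "3": 3, "4": 4, "5": 5, "6": 6, "7": 7, "8": 8, "9": 9, "T": 10, "J": 11, "Q": 12, "K": 13, "A": 14}
--
-- def _parse_board(board: List[str]) -> Tuple[List[int], List[str]]:
--     ranks: List[int] = []
--     suits: List[str] = []
--     for card in board:
--         if not card or len(card) != 2:
--             continue
--         rank = RANK_ORDER.get(card[0].upper())
--         suit = card[1].lower()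
--         if rank:
--             ranks.append(rank)
--         suits.append(suit)
--     return ranks, suits
--
-- def _board_flags(board: List[str]) -> Dict[str, bool]:
--     ranks, suits = _parse_board(board)
--     paired = len(ranks) != len(set(ranks))
--     suit_counts: Dict[str, int] = {}
--     for s in suits:
--         suit_counts[s] = suit_counts.get(s, 0) + 1
--     max_suit = max(suit_counts.values()) if suit_counts else 0
--     flush_draw_possible = max_suit >= 3  # 3+ to one suit on board
--     monotone = max_suit == len(board) and len(board) > 0
--
--     straight_draw_possible = False
--     if len(ranks) >= 3:
--         unique = sorted(set(ranks))
--         for i in range(len(unique)):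
--             window = unique[i : i + 3]
--             if len(window) == 3 and max(window) - min(window) <= 4:
--                 straight_draw_possible = True
--                 break
--
--     return {
--         "paired_board": paired,
--         "flush_draw_possible": flush_draw_possible,
--         "straight_draw_possible": straight_draw_possible,
--         "monotone_board": monotone,
--     }
-- ===== SOURCE B (Python) =====
-- from typing import Dict, List, Tuple
--
-- RANK_ORDER = {"2": 2, "3": 3, "4": 4, "5": 5, "6": 6, "7": 7, "8": 8, "9": 9, "T": 10, "J": 11, "Q": 12, "K": 13, "A": 14}
--
-- def _parse_board(board: List[str]) -> Tuple[List[int], List[str]]: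
--     ranks: List[int] = []
--     suits: List[str] = []
--     for card in board:
--         if not card or len(card) != 2:
--             continue
--         rank = RANK_ORDER.get(card[0].upper())
--         suit = card[1].lower()
--         if rank:
--             ranks.append(rank)
--         suits.append(suit)
--     return ranks, suits
--
-- def _board_flags(board: List[str]) -> Dict[str, bool]:
--     ranks, suits = _parse_board(board)
--     present = set(ranks)
--     paired = len(present) != len(ranks)
--     # max suit multiplicity: count each distinct suit once, no running counter dict
--     max_suit = max((suits.count(s) for s in set(suits)), default=0)
--     flush_draw_possible = max_suit >= 3
--     monotone = max_suit == len(board) and len(board) > 0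
--     # straight draw: slide a fixed 5-wide window over rank space 2..14 and look
--     # for >= 3 distinct present ranks inside it, instead of sorting + 3-windows
--     straight_draw_possible = False
--     if len(ranks) >= 3:
--         for start in range(2, 11):
--             if sum(1 for r in range(start, start + 5) if r in present) >= 3:
--                 straight_draw_possible = True
--                 break
--     return {
--         "paired_board": paired,
--         "flush_draw_possible": flush_draw_possible,
--         "straight_draw_possible": straight_draw_possible,
--         "monotone_board": monotone,
--     }
-- ===== Notes on version B (the rewrite author's own statement) =====
-- stated objective: alternative
-- what changed: Straight-draw detection slides a fixed 5-wide window over rank space 2..10 counting present ranks from a presence set instead of sorting the unique ranks and sliding a 3-wide window over them, pairing uses the presence set directly, and the max suit multiplicity is taken as max of suits.count(s) over the distinct suits instead of building a running counter dict.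
import Mathlib
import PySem

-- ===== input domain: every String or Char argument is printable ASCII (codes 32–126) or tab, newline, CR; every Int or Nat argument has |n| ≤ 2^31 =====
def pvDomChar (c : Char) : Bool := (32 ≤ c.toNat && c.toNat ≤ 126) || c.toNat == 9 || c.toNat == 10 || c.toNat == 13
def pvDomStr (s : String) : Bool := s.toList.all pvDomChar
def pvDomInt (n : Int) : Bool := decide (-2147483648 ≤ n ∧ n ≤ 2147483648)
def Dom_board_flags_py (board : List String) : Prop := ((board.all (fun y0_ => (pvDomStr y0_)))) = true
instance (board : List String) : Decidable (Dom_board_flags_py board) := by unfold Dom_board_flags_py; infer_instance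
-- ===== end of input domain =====

-- B replaces A's sort+3-window straight-draw scan by a fixed 5-wide window scan over rank
-- space against a presence set, and A's running suit-counter dict by per-distinct-suit counts
-- (alternative decomposition, same results; return value only — nothing is mutated).

-- ===== PORT A =====
-- module constant RANK_ORDER (keys are the single characters of the 1-char Python strings)
def pvRankOrder : PySem.Dict Char Int :=
  PySem.Dict.ofList [('2', 2), ('3', 3), ('4', 4), ('5', 5), ('6', 6), ('7', 7), ('8', 8),
                     ('9', 9), ('T', 10), ('J', 11), ('Q', 12), ('K', 13), ('A', 14)]

-- helper _parse_board, shared verbatim by A and by B (Source B carries the identical function)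
def parseBoard (board : List String) : List Int × List Char :=
  board.foldl (fun st card =>
    if card = "" ∨ PySem.Str.len card ≠ 2 then st
    else
      match PySem.Str.pyGet? card 0, PySem.Str.pyGet? card 1 with
      | some c0, some c1 =>
          ((match pvRankOrder.get? (PySem.Chars.upperChar c0) with
            | some r => if r = 0 then st.1 else st.1 ++ [r]   -- `if rank:` (None and 0 falsy)
            | none => st.1),
           st.2 ++ [PySem.Chars.lowerChar c1])
      | _, _ => st) ([], [])

-- A's straight-draw loop over unique = sorted(set(ranks)) with its first-hit break
def strLoopA (unique : List Int) : Bool :=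
  (PySem.List.pyRange 0 unique.length 1).any (fun i =>
    let window := PySem.List.slice unique (some i) (some (i + 3))
    decide (window.length = 3) &&
      decide ((PySem.List.max? window (fun x => x)).getD 0
                - (PySem.List.min? window (fun x => x)).getD 0 ≤ 4))

def board_flags_py (board : List String) : List (String × Bool) :=
  let pr := parseBoard board
  let ranks := pr.1
  let suits := pr.2
  let paired := decide (ranks.length ≠ (PySem.Set.ofList ranks).length)
  let suit_counts := suits.foldl (fun d s => d.insert s (d.getD s 0 + 1)) PySem.Dict.empty
  let max_suit : Int :=
    if suit_counts.size = 0 then 0 else (PySem.List.max? suit_counts.values (fun v => v)).getD 0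
  let flush := decide ((3 : Int) ≤ max_suit)
  let monotone := decide (max_suit = (board.length : Int)) && decide (0 < board.length)
  let straight :=
    if 3 ≤ ranks.length then
      strLoopA (PySem.List.sorted (PySem.Set.ofList ranks) (fun x => x))
    else false
  [("paired_board", paired), ("flush_draw_possible", flush),
   ("straight_draw_possible", straight), ("monotone_board", monotone)]

-- ===== PORT B =====
-- B's straight-draw loop: fixed windows [start, start+4] over rank space, counting present ranks
def strLoopB (present : List Int) : Bool :=
  (PySem.List.pyRange 2 11 1).any (fun start =>
    decide ((3 : Int) ≤
      ((PySem.List.pyRange start (start + 5) 1).map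
        (fun r => if r ∈ present then (1 : Int) else 0)).sum))

def board_flags_py_alt (board : List String) : List (String × Bool) :=
  let pr := parseBoard board
  let ranks := pr.1
  let suits := pr.2
  let present := PySem.Set.ofList ranks
  let paired := decide (present.length ≠ ranks.length)
  let max_suit : Int :=
    PySem.List.maxD ((PySem.Set.ofList suits).map (fun s => (PySem.List.count suits s : Int)))
      (fun v => v) 0
  let flush := decide ((3 : Int) ≤ max_suit)
  let monotone := decide (max_suit = (board.length : Int)) && decide (0 < board.length)
  let straight := if 3 ≤ ranks.length then strLoopB present else false
  [("paired_board", paired), ("flush_draw_possible", flush),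
   ("straight_draw_possible", straight), ("monotone_board", monotone)]

-- ===== PRECONDITION & SPEC =====
def Spec_board_flags_py (board : List String) (out : List (String × Bool)) : Prop := out = board_flags_py_alt board
instance (board : List String) (out : List (String × Bool)) : Decidable (Spec_board_flags_py board out) := by unfold Spec_board_flags_py; infer_instance

-- ===== CLAIM (what is proved, stated in full; the proofs are below) =====
def Claim_equal_board_flags_py : Prop := ∀ (board : List String), Dom_board_flags_py board → Spec_board_flags_py board (board_flags_py board)

-- ===== LEMMAS AND PROOFS =====

-- the 13 possible rank values
def pvRankList : List Int := [2, 3, 4, 5, 6, 7, 8, 9, 10, 11, 12, 13, 14]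

theorem pvRank_bounds (x : Int) (h : x ∈ pvRankList) : 2 ≤ x ∧ x ≤ 14 := by
  simp [pvRankList] at h
  rcases h with h|h|h|h|h|h|h|h|h|h|h|h|h <;> omega

theorem rank_value_mem (c : Char) (v : Int) (h : pvRankOrder.get? c = some v) : v ∈ pvRankList := by
  have h2 := PySem.Dict.mem_items_of_get?_eq_some _ h
  simp only [show pvRankOrder.items = [('2', 2), ('3', 3), ('4', 4), ('5', 5), ('6', 6), ('7', 7), ('8', 8),
      ('9', 9), ('T', 10), ('J', 11), ('Q', 12), ('K', 13), ('A', 14)] from rfl] at h2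
  simp only [List.mem_cons, List.not_mem_nil, or_false, Prod.mk.injEq] at h2
  rcases h2 with ⟨_, rfl⟩|⟨_, rfl⟩|⟨_, rfl⟩|⟨_, rfl⟩|⟨_, rfl⟩|⟨_, rfl⟩|⟨_, rfl⟩|⟨_, rfl⟩|⟨_, rfl⟩|⟨_, rfl⟩|⟨_, rfl⟩|⟨_, rfl⟩|⟨_, rfl⟩ <;> simp [pvRankList]

theorem parse_ranks_mem (board : List String) : ∀ r ∈ (parseBoard board).1, r ∈ pvRankList := by
  unfold parseBoard
  suffices h : ∀ (st : List Int × List Char), (∀ r ∈ st.1, r ∈ pvRankList) →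
      ∀ r ∈ (board.foldl (fun st card =>
        if card = "" ∨ PySem.Str.len card ≠ 2 then st
        else
          match PySem.Str.pyGet? card 0, PySem.Str.pyGet? card 1 with
          | some c0, some c1 =>
              ((match pvRankOrder.get? (PySem.Chars.upperChar c0) with
                | some r => if r = 0 then st.1 else st.1 ++ [r]
                | none => st.1),
               st.2 ++ [PySem.Chars.lowerChar c1])
          | _, _ => st) st).1, r ∈ pvRankList by
    exact h ([], []) (by simp)
  induction board with
  | nil => intro st hst; simpa using hst
  | cons card rest ih =>
    intro st hst
    simp only [List.foldl_cons]
    apply ih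
    split
    · exact hst
    · split
      · split
        · rename_i r hr
          split
          · exact hst
          · intro x hx
            rcases List.mem_append.mp hx with h | h
            · exact hst x h
            · simp at h; subst h; exact rank_value_mem _ _ hr
        · exact hst
      · exact hst

-- strictly increasing lists: indexed monotonicity
theorem getElem_lt_of_pairwise_lt (u : List Int) (hu : u.Pairwise (· < ·)) (i j : Nat)
    (hj : j < u.length) (hij : i < j) : u[i]'(by omega) < u[j] :=
  List.pairwise_iff_getElem.mp hu i j (by omega) hj hij

theorem getElem_le_of_pairwise_lt (u : List Int) (hu : u.Pairwise (· < ·)) (i j : Nat)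
    (hj : j < u.length) (hij : i ≤ j) : u[i]'(by omega) ≤ u[j] := by
  rcases Nat.lt_or_ge i j with h | h
  · exact le_of_lt (getElem_lt_of_pairwise_lt u hu i j hj h)
  · have : i = j := by omega
    subst this; exact le_refl _

theorem idx_lt_of_val_lt (u : List Int) (hu : u.Pairwise (· < ·)) (i j : Nat)
    (hi : i < u.length) (hj : j < u.length) (h : u[i] < u[j]) : i < j := by
  by_contra hc
  rcases Nat.lt_or_ge j i with h2 | h2
  · exact absurd (getElem_lt_of_pairwise_lt u hu j i hi h2) (by omega)
  · have : i = j := by omega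
    subst this; omega

theorem sublist_of_pairwise_lt_subset (l : List Int) (hl : l.Pairwise (· < ·)) :
    ∀ (u : List Int), u.Pairwise (· < ·) → (∀ x ∈ u, x ∈ l) → u.Sublist l := by
  induction l with
  | nil =>
    intro u _ h
    cases u with
    | nil => exact List.Sublist.refl _
    | cons a t => exact absurd (h a (by simp)) (by simp)
  | cons b l' ih =>
    intro u hu h
    cases u with
    | nil => exact List.nil_sublist _
    | cons a u' =>
      have hbl' := (List.pairwise_cons.mp hl).1
      have hau' := (List.pairwise_cons.mp hu).1
      rcases List.mem_cons.mp (h a (by simp)) with rfl | ha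
      · apply List.Sublist.cons₂
        apply ih (List.Pairwise.of_cons hl) u' (List.Pairwise.of_cons hu)
        intro x hx
        rcases List.mem_cons.mp (h x (by simp [hx])) with rfl | hxl'
        · exact absurd (hau' x hx) (by omega)
        · exact hxl'
      · apply List.Sublist.cons
        apply ih (List.Pairwise.of_cons hl) (a :: u') hu
        intro x hx
        rcases List.mem_cons.mp hx with rfl | hxu'
        · exact ha
        · rcases List.mem_cons.mp (h x (by simp [hxu'])) with rfl | hxl'
          · have h1 := hbl' a ha
            have h2 := hau' x hxu'
            omega
          · exact hxl'

theorem window_eq (u : List Int) (k : Nat) (h : k + 2 < u.length) :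
    (u.drop k).take 3 = [u[k]'(by omega), u[k + 1]'(by omega), u[k + 2]'h] := by
  apply List.ext_getElem
  · simp; omega
  · intro i hi1 hi2
    simp only [List.length_take, List.length_drop] at hi1
    have hi3 : i < 3 := by omega
    interval_cases i <;> simp [List.getElem_take, List.getElem_drop]

-- characterization of A's straight-draw loop on a strictly increasing list
theorem strLoopA_iff (u : List Int) (hu : u.Pairwise (· < ·)) :
    strLoopA u = true ↔ ∃ (k : Nat) (h : k + 2 < u.length), u[k + 2]'h - u[k]'(by omega) ≤ 4 := by
  unfold strLoopA
  rw [List.any_eq_true]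
  constructor
  · rintro ⟨i, hi, hp⟩
    rw [PySem.List.mem_pyRange_one] at hi
    obtain ⟨hi0, hilen⟩ := hi
    simp only [Bool.and_eq_true, decide_eq_true_eq] at hp
    obtain ⟨hlen, hmm⟩ := hp
    rw [PySem.List.slice_toNat u hi0 (by omega)] at hlen hmm
    have h3 : (i + 3).toNat - i.toNat = 3 := by omega
    rw [h3] at hlen hmm
    set k := i.toNat with hk
    have hklen : k + 2 < u.length := by
      simp only [List.length_take, List.length_drop] at hlen
      omega
    refine ⟨k, hklen, ?_⟩
    rw [window_eq u k hklen] at hmm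
    rw [PySem.List.max?_id_cons, PySem.List.min?_id_cons] at hmm
    simp only [List.foldl_cons, List.foldl_nil, Option.getD_some] at hmm
    have h1 := getElem_lt_of_pairwise_lt u hu k (k + 1) (by omega) (by omega)
    have h2 := getElem_lt_of_pairwise_lt u hu (k + 1) (k + 2) (by omega) (by omega)
    omega
  · rintro ⟨k, hklen, hdiff⟩
    refine ⟨(k : Int), ?_, ?_⟩
    · rw [PySem.List.mem_pyRange_one]
      constructor
      · omega
      · exact_mod_cast (by omega : (k : Int) < (u.length : Int))
    · simp only [Bool.and_eq_true, decide_eq_true_eq]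
      rw [PySem.List.slice_toNat u (by omega) (by omega)]
      have h3 : ((k : Int) + 3).toNat - ((k : Int)).toNat = 3 := by omega
      rw [h3, Int.toNat_natCast, window_eq u k hklen]
      refine ⟨rfl, ?_⟩
      rw [PySem.List.max?_id_cons, PySem.List.min?_id_cons]
      simp only [List.foldl_cons, List.foldl_nil, Option.getD_some]
      have h1 := getElem_lt_of_pairwise_lt u hu k (k + 1) (by omega) (by omega)
      have h2 := getElem_lt_of_pairwise_lt u hu (k + 1) (k + 2) (by omega) (by omega)
      omega

-- characterization of B's straight-draw loop
theorem strLoopB_iff (u : List Int) :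
    strLoopB u = true ↔ ∃ s : Int, 2 ≤ s ∧ s < 11 ∧
      3 ≤ ((PySem.List.pyRange s (s + 5) 1).filter (fun r => decide (r ∈ u))).length := by
  unfold strLoopB
  rw [List.any_eq_true]
  have hsum : ∀ s : Int, ((PySem.List.pyRange s (s + 5) 1).map (fun r => if r ∈ u then (1 : Int) else 0)).sum
      = (((PySem.List.pyRange s (s + 5) 1).filter (fun r => decide (r ∈ u))).length : Int) := by
    intro s
    have heq : (fun r => if r ∈ u then (1 : Int) else 0)
        = (fun r => if (fun r => decide (r ∈ u)) r = true then (1 : Int) else 0) := by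
      funext r; simp
    rw [heq, PySem.List.sum_map_ite_one_zero, List.countP_eq_length_filter]
  constructor
  · rintro ⟨s, hs, hp⟩
    rw [PySem.List.mem_pyRange_one] at hs
    simp only [decide_eq_true_eq] at hp
    rw [hsum s] at hp
    exact ⟨s, hs.1, hs.2, by exact_mod_cast hp⟩
  · rintro ⟨s, h2, h11, hlen⟩
    refine ⟨s, PySem.List.mem_pyRange_one.mpr ⟨h2, h11⟩, ?_⟩
    simp only [decide_eq_true_eq]
    rw [hsum s]
    exact_mod_cast hlen

-- the two straight-draw loops agree on every strictly increasing list of values in [2, 14]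
theorem strLoop_eq (u : List Int) (hu : u.Pairwise (· < ·))
    (hr : ∀ x ∈ u, 2 ≤ x ∧ x ≤ 14) : strLoopA u = strLoopB u := by
  rw [Bool.eq_iff_iff, strLoopA_iff u hu, strLoopB_iff u]
  constructor
  · rintro ⟨k, hklen, hdiff⟩
    set a := u[k]'(by omega) with ha
    set b := u[k + 1]'(by omega) with hb
    set c := u[k + 2]'hklen with hc
    have hab := getElem_lt_of_pairwise_lt u hu k (k + 1) (by omega) (by omega)
    have hbc := getElem_lt_of_pairwise_lt u hu (k + 1) (k + 2) (by omega) (by omega)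
    have hamem : a ∈ u := by rw [ha]; exact List.getElem_mem _
    have hbmem : b ∈ u := by rw [hb]; exact List.getElem_mem _
    have hcmem : c ∈ u := by rw [hc]; exact List.getElem_mem _
    have hba := hr a hamem
    have hbb := hr b hbmem
    have hbcb := hr c hcmem
    refine ⟨min a 10, by omega, by omega, ?_⟩
    have hsub : [a, b, c].Sublist ((PySem.List.pyRange (min a 10) (min a 10 + 5) 1).filter (fun r => decide (r ∈ u))) := by
      apply sublist_of_pairwise_lt_subset
      · exact List.Pairwise.filter _ (PySem.List.pairwise_lt_pyRange_one _ _)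
      · simp only [List.pairwise_cons, List.mem_cons, List.not_mem_nil]
        constructor
        · rintro x (rfl | rfl | h) <;> first | omega | simp at h
        · constructor
          · rintro x (rfl | h) <;> first | omega | simp at h
          · simp
      · intro x hx
        rw [List.mem_filter]
        rcases List.mem_cons.mp hx with rfl | hx2
        · exact ⟨PySem.List.mem_pyRange_one.mpr ⟨by omega, by omega⟩, by simp [hamem]⟩
        · rcases List.mem_cons.mp hx2 with rfl | hx3
          · exact ⟨PySem.List.mem_pyRange_one.mpr ⟨by omega, by omega⟩, by simp [hbmem]⟩
          · have : x = c := by simpa using hx3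
            subst this
            exact ⟨PySem.List.mem_pyRange_one.mpr ⟨by omega, by omega⟩, by simp [hcmem]⟩
    have := hsub.length_le
    simpa using this
  · rintro ⟨s, h2, h11, hlen⟩
    set m := (PySem.List.pyRange s (s + 5) 1).filter (fun r => decide (r ∈ u)) with hm
    have hmp : m.Pairwise (· < ·) := List.Pairwise.filter _ (PySem.List.pairwise_lt_pyRange_one _ _)
    have h0 : 0 < m.length := by omega
    have h1 : 1 < m.length := by omega
    have h2' : 2 < m.length := by omega
    have hprop' : ∀ x ∈ m, x ∈ u ∧ s ≤ x ∧ x < s + 5 := by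
      intro x hx
      rw [hm, List.mem_filter] at hx
      obtain ⟨hrange, hmem⟩ := hx
      rw [PySem.List.mem_pyRange_one] at hrange
      simp only [decide_eq_true_eq] at hmem
      exact ⟨hmem, hrange.1, hrange.2⟩
    have hprop : ∀ (i : Nat) (hi : i < m.length), m[i] ∈ u ∧ s ≤ m[i] ∧ m[i] < s + 5 :=
      fun i hi => hprop' _ (List.getElem_mem hi)
    obtain ⟨hm0u, hm0l, hm0r⟩ := hprop 0 h0
    obtain ⟨hm1u, hm1l, hm1r⟩ := hprop 1 h1
    obtain ⟨hm2u, hm2l, hm2r⟩ := hprop 2 h2'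
    obtain ⟨j1, hj1, hj1v⟩ := List.mem_iff_getElem.mp hm0u
    obtain ⟨j2, hj2, hj2v⟩ := List.mem_iff_getElem.mp hm1u
    obtain ⟨j3, hj3, hj3v⟩ := List.mem_iff_getElem.mp hm2u
    have hm01 := getElem_lt_of_pairwise_lt m hmp 0 1 h1 (by omega)
    have hm12 := getElem_lt_of_pairwise_lt m hmp 1 2 h2' (by omega)
    have hj12 : j1 < j2 := idx_lt_of_val_lt u hu j1 j2 hj1 hj2 (by rw [hj1v, hj2v]; exact hm01)
    have hj23 : j2 < j3 := idx_lt_of_val_lt u hu j2 j3 hj2 hj3 (by rw [hj2v, hj3v]; exact hm12)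
    have hklen : j1 + 2 < u.length := by omega
    refine ⟨j1, hklen, ?_⟩
    have hle : u[j1 + 2]'hklen ≤ u[j3] := getElem_le_of_pairwise_lt u hu (j1 + 2) j3 hj3 (by omega)
    rw [hj1v, hj3v] at *
    omega

theorem strLoopB_sorted (ranks : List Int) :
    strLoopB (PySem.List.sorted (PySem.Set.ofList ranks) (fun x => x)) =
      strLoopB (PySem.Set.ofList ranks) := by
  unfold strLoopB
  simp only [PySem.List.mem_sorted]

theorem straight_eq (ranks : List Int) (h : ∀ r ∈ ranks, r ∈ pvRankList) :
    strLoopA (PySem.List.sorted (PySem.Set.ofList ranks) (fun x => x)) =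
      strLoopB (PySem.Set.ofList ranks) := by
  rw [← strLoopB_sorted]
  apply strLoop_eq
  · exact PySem.List.sorted_ofList_pairwise_lt ranks
  · intro x hx
    rw [PySem.List.mem_sorted] at hx
    exact pvRank_bounds x (h x ((PySem.List.mem_dedup ranks x).mp hx))

theorem max_eq (suits : List Char) :
    (if (suits.foldl (fun d s => d.insert s (d.getD s 0 + 1)) (PySem.Dict.empty : PySem.Dict Char Int)).size = 0 then (0 : Int)
     else (PySem.List.max? (suits.foldl (fun d s => d.insert s (d.getD s 0 + 1)) (PySem.Dict.empty : PySem.Dict Char Int)).values (fun v => v)).getD 0) =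
    PySem.List.maxD ((PySem.Set.ofList suits).map (fun s => (PySem.List.count suits s : Int))) (fun v => v) 0 := by
  have hv : (suits.foldl (fun d s => d.insert s (d.getD s 0 + 1)) (PySem.Dict.empty : PySem.Dict Char Int)).values
      = (PySem.Set.ofList suits).map (fun s => (PySem.List.count suits s : Int)) := by
    have h1 : (PySem.Dict.counter suits).values
        = (PySem.Set.ofList suits).map (fun s => (PySem.List.count suits s : Int)) := by
      show (PySem.Dict.counter suits).items.map (·.2) = _
      rw [PySem.Dict.items_counter, List.map_map]
      exact List.map_congr_left (fun s _ => by simp [PySem.List.count_eq])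
    exact h1
  have hsz : (suits.foldl (fun d s => d.insert s (d.getD s 0 + 1)) (PySem.Dict.empty : PySem.Dict Char Int)).size
      = (suits.foldl (fun d s => d.insert s (d.getD s 0 + 1)) (PySem.Dict.empty : PySem.Dict Char Int)).values.length := by
    show (suits.foldl (fun d s => d.insert s (d.getD s 0 + 1)) (PySem.Dict.empty : PySem.Dict Char Int)).items.length
        = ((suits.foldl (fun d s => d.insert s (d.getD s 0 + 1)) (PySem.Dict.empty : PySem.Dict Char Int)).items.map (·.2)).length
    rw [List.length_map]
  rw [hsz, hv, List.length_map]
  rcases h : PySem.Set.ofList suits with _ | ⟨x, t⟩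
  · simp [PySem.List.maxD, PySem.List.max?]
  · simp [PySem.List.maxD]

theorem paired_eq (ranks : List Int) :
    decide (ranks.length ≠ (PySem.Set.ofList ranks).length)
      = decide ((PySem.Set.ofList ranks).length ≠ ranks.length) :=
  decide_eq_decide.mpr ne_comm

-- ===== VERDICT (by name: the statement is the Claim_ definition above) =====
theorem board_flags_py_spec : Claim_equal_board_flags_py := by
  intro board _
  unfold Spec_board_flags_py board_flags_py board_flags_py_alt
  have hmem := parse_ranks_mem board
  dsimp only
  rw [paired_eq, max_eq, straight_eq _ hmem]
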